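-- pv_equiv track=rewrite | github.com/oriolf/adventofcode-2025 | d2/solve.py | valid_id
-- ===== SOURCE A (Python) =====
-- def valid_id(s, delta, length):
--     start, end = 0, delta
--     while end < length:
--         if s[start:end] != s[end : end + delta]:
--             return True
--         start += delta
--         end += delta
--
--     return False
-- ===== SOURCE B (Python) =====
-- def valid_id(s, delta, length):
--     m = max((length - 1) // delta, 0)
--     return s[0:m * delta] != s[delta:(m + 1) * delta]
-- ===== Notes on version B (the rewrite author's own statement) =====
-- stated objective: simpler
-- what changed: Replaces the sliding while-loop over adjacent delta-blocks by a single closed-form comparison of two overlapping slices s[0:m*delta] != s[delta:(m+1)*delta] with m = max((length-1)//delta, 0).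
-- outside the precondition, e.g. on valid_id('ab', -1, 5): A returns True, B returns False; on valid_id('ab', 0, 0): A returns False, B raises ZeroDivisionError
import Mathlib
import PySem

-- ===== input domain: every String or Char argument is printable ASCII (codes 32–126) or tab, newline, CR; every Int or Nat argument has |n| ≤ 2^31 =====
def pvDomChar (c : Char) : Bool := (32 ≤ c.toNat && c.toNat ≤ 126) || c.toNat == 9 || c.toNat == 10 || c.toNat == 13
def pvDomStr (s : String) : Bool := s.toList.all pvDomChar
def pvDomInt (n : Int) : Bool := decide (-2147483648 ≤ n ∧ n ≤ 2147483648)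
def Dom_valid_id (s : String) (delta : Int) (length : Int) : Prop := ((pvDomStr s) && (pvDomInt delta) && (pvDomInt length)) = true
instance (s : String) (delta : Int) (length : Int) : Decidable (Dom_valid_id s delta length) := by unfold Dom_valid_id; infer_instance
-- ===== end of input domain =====

-- B replaces A's sliding while-loop over adjacent delta-blocks by one closed-form
-- comparison of two overlapping slices (simpler: no loop, no per-block branching).


-- ===== PORT A =====
-- the while-loop of A, fuel-totalised (the fuel only makes the recursion structural;
-- under Pre_ it is large enough never to run out — proved below)
def validIdLoop (cs : List Char) (delta L start e : Int) : Nat → Bool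
  | 0 => false
  | Nat.succ fuel =>
    if e < L then
      if PySem.List.slice cs (some start) (some e) ≠ PySem.List.slice cs (some e) (some (e + delta)) then
        true
      else
        validIdLoop cs delta L (start + delta) (e + delta) fuel
    else false

def valid_id (s : String) (delta : Int) (length : Int) : Bool :=
  validIdLoop s.toList delta length 0 delta ((length - delta).toNat + 1)

-- ===== PORT B =====
def valid_id_alt (s : String) (delta : Int) (length : Int) : Bool :=
  let m := max (PySem.Int.floordiv (length - 1) delta) 0
  decide (PySem.List.slice s.toList (some 0) (some (m * delta)) ≠
          PySem.List.slice s.toList (some delta) (some ((m + 1) * delta)))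

-- ===== PRECONDITION & SPEC =====
-- Pre_ excludes delta ≤ 0, outside the task's natural domain: there the Python A
-- diverges on most inputs (end never reaches length) and returns only on accidental
-- corners (an empty negative slice differing, or length ≤ delta).
def Pre_valid_id (s : String) (delta : Int) (length : Int) : Prop := 0 < delta
instance (s : String) (delta : Int) (length : Int) : Decidable (Pre_valid_id s delta length) := by
  unfold Pre_valid_id; infer_instance

def pvWitness_valid_id : String × Int × Int := ("aba", 1, 3)

def Spec_valid_id (s : String) (delta : Int) (length : Int) (out : Bool) : Prop := out = valid_id_alt s delta length
instance (s : String) (delta : Int) (length : Int) (out : Bool) : Decidable (Spec_valid_id s delta length out) := by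
  unfold Spec_valid_id; infer_instance

-- ===== CLAIM (what is proved, stated in full; the proofs are below) =====
def Claim_equal_valid_id : Prop := ∀ (s : String) (delta : Int) (length : Int), Dom_valid_id s delta length → Pre_valid_id s delta length → Spec_valid_id s delta length (valid_id s delta length)

-- ===== LEMMAS AND PROOFS =====

-- clamped contiguous slice over Nat bounds (= PySem.List.slice on cast bounds)
def sliceN (cs : List Char) (a b : Nat) : List Char := (cs.drop a).take (b - a)

-- adjacent-block comparison chain, upward from block k, t comparisons
def blocksUp (cs : List Char) (d : Nat) : Nat → Nat → Bool
  | _, 0 => true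
  | k, Nat.succ t =>
    decide (sliceN cs (k * d) ((k + 1) * d) = sliceN cs ((k + 1) * d) ((k + 2) * d)) &&
    blocksUp cs d (k + 1) t

theorem length_sliceN (cs : List Char) (a b : Nat) :
    (sliceN cs a b).length = min b cs.length - min a cs.length := by
  simp [sliceN]; omega

theorem sliceN_append (cs : List Char) (a b c : Nat) (hab : a ≤ b) (hbc : b ≤ c) :
    sliceN cs a b ++ sliceN cs b c = sliceN cs a c := by
  unfold sliceN
  have h1 : c - a = (b - a) + (c - b) := by omega
  rw [h1, List.take_add, List.drop_drop, show a + (b - a) = b from by omega]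

theorem blocksUp_true_iff (cs : List Char) (d : Nat) :
    ∀ (t k : Nat), (blocksUp cs d k t = true ↔
      sliceN cs (k * d) ((k + t) * d) = sliceN cs ((k + 1) * d) ((k + 1 + t) * d)) := by
  intro t
  induction t with
  | zero =>
    intro k
    simp [blocksUp, sliceN]
  | succ t ih =>
    intro k
    have split1 : sliceN cs (k * d) ((k + (t + 1)) * d)
        = sliceN cs (k * d) ((k + 1) * d) ++ sliceN cs ((k + 1) * d) ((k + 1 + t) * d) := by
      rw [sliceN_append cs (k * d) ((k + 1) * d) ((k + 1 + t) * d)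
        (by exact Nat.mul_le_mul_right d (by omega)) (by exact Nat.mul_le_mul_right d (by omega))]
      congr 2
      omega
    have split2 : sliceN cs ((k + 1) * d) ((k + 1 + (t + 1)) * d)
        = sliceN cs ((k + 1) * d) ((k + 2) * d) ++ sliceN cs ((k + 2) * d) ((k + 2 + t) * d) := by
      rw [sliceN_append cs ((k + 1) * d) ((k + 2) * d) ((k + 2 + t) * d)
        (by exact Nat.mul_le_mul_right d (by omega)) (by exact Nat.mul_le_mul_right d (by omega))]
      congr 2
      omega
    rw [split1, split2]
    constructor
    · intro h
      simp only [blocksUp, Bool.and_eq_true, decide_eq_true_eq] at h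
      obtain ⟨hblk, hrest⟩ := h
      exact congrArg₂ (· ++ ·) hblk ((ih (k + 1)).mp hrest)
    · intro h
      -- lengths: first pieces / remainders are nonincreasing in the start block
      have hlen1 : (sliceN cs ((k + 1) * d) ((k + 2) * d)).length ≤
          (sliceN cs (k * d) ((k + 1) * d)).length := by
        rw [length_sliceN, length_sliceN]
        have e1 : (k + 1) * d = k * d + d := by ring
        have e2 : (k + 2) * d = k * d + d + d := by ring
        rw [e1, e2]
        omega
      have htot : (sliceN cs (k * d) ((k + 1) * d)).length +
            (sliceN cs ((k + 1) * d) ((k + 1 + t) * d)).length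
          = (sliceN cs ((k + 1) * d) ((k + 2) * d)).length +
            (sliceN cs ((k + 2) * d) ((k + 2 + t) * d)).length := by
        have := congrArg List.length h
        simpa using this
      have hlen2 : (sliceN cs ((k + 2) * d) ((k + 2 + t) * d)).length ≤
          (sliceN cs ((k + 1) * d) ((k + 1 + t) * d)).length := by
        simp only [length_sliceN]
        have e1 : (k + 1) * d = k * d + d := by ring
        have e2 : (k + 2) * d = k * d + d + d := by ring
        have e3 : (k + 1 + t) * d = k * d + d + t * d := by ring
        have e4 : (k + 2 + t) * d = k * d + d + d + t * d := by ring
        rw [e1, e2, e3, e4]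
        omega
      have hlenEq : (sliceN cs (k * d) ((k + 1) * d)).length =
          (sliceN cs ((k + 1) * d) ((k + 2) * d)).length := by omega
      obtain ⟨hA, hB⟩ := List.append_inj h hlenEq
      simp only [blocksUp, Bool.and_eq_true, decide_eq_true_eq]
      exact ⟨hA, (ih (k + 1)).mpr hB⟩

-- the loop of A computes the negation of the upward block chain
theorem loop_eq_blocksUp (cs : List Char) (L : Int) (d : Nat) (hd : 0 < d) (M : Nat)
    (hM : M = (PySem.Int.floordiv (L - 1) (d : Int)).toNat) :
    ∀ (fuel k : Nat), M < k + fuel →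
      validIdLoop cs (d : Int) L ((k : Int) * d) (((k : Int) + 1) * d) fuel
        = ! blocksUp cs d k (M - k) := by
  have hδ : (0 : Int) < (d : Int) := by exact_mod_cast hd
  have bridge : ∀ k : Nat, (((k : Int) + 1) * d < L ↔ k < M) := by
    intro k
    have h1 : ((k : Int) + 1) ≤ PySem.Int.floordiv (L - 1) (d : Int) ↔ ((k : Int) + 1) * d ≤ L - 1 :=
      PySem.Int.le_floordiv_iff_mul_le hδ
    have h2 : ((PySem.Int.floordiv (L - 1) (d : Int)).toNat : Int) = max (PySem.Int.floordiv (L - 1) (d : Int)) 0 := by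
      omega
    constructor
    · intro h
      have : ((k : Int) + 1) ≤ PySem.Int.floordiv (L - 1) (d : Int) := h1.mpr (by omega)
      omega
    · intro h
      have : ((k : Int) + 1) ≤ PySem.Int.floordiv (L - 1) (d : Int) := by omega
      have := h1.mp this
      omega
  intro fuel
  induction fuel with
  | zero =>
    intro k hk
    have : ¬ k < M := by omega
    have hMk : M - k = 0 := by omega
    simp [validIdLoop, hMk, blocksUp]
  | succ fuel ih =>
    intro k hk
    by_cases hcond : (((k : Int)) + 1) * d < L
    · have hkM : k < M := (bridge k).mp hcond
      have hMk : M - k = (M - (k + 1)) + 1 := by omega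
      -- cast the Int slice bounds to Nat products
      have c1 : (k : Int) * d = ((k * d : Nat) : Int) := by push_cast; ring
      have c2 : ((k : Int) + 1) * d = (((k + 1) * d : Nat) : Int) := by push_cast; ring
      have c3 : (((k + 1) * d : Nat) : Int) + d = (((k + 2) * d : Nat) : Int) := by push_cast; ring
      rw [validIdLoop, if_pos hcond, hMk, blocksUp, c1, c2, c3,
        PySem.List.slice_natCast, PySem.List.slice_natCast]
      by_cases heq : sliceN cs (k * d) ((k + 1) * d) = sliceN cs ((k + 1) * d) ((k + 2) * d)
      · have hA : (cs.drop (k * d)).take ((k + 1) * d - k * d)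
            = (cs.drop ((k + 1) * d)).take ((k + 2) * d - (k + 1) * d) := heq
        rw [if_neg (by simpa using hA)]
        have st1 : ((k * d : Nat) : Int) + d = (((k + 1) : Nat) : Int) * d := by push_cast; ring
        have st2 : (((k + 2) * d : Nat) : Int) = ((((k + 1) : Nat) : Int) + 1) * d := by push_cast; ring
        rw [st1, st2, ih (k + 1) (by omega)]
        simp [heq]
      · have hA : ¬ ((cs.drop (k * d)).take ((k + 1) * d - k * d)
            = (cs.drop ((k + 1) * d)).take ((k + 2) * d - (k + 1) * d)) := heq
        rw [if_pos (by simpa using hA)]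
        simp [heq]
    · have hkM : ¬ k < M := fun h => hcond ((bridge k).mpr h)
      have hMk : M - k = 0 := by omega
      rw [validIdLoop, if_neg hcond, hMk]
      rfl

-- ===== VERDICT (by name: the statement is the Claim_ definition above) =====
theorem valid_id_spec : Claim_equal_valid_id := by
  intro s delta L _hDom hPre
  replace hPre : 0 < delta := hPre
  unfold Spec_valid_id valid_id valid_id_alt
  obtain ⟨d, rfl⟩ : ∃ d : Nat, delta = (d : Int) :=
    ⟨delta.toNat, (Int.toNat_of_nonneg (le_of_lt hPre)).symm⟩
  have hd : 0 < d := by exact_mod_cast hPre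
  set cs : List Char := s.toList with hcs
  set m : Int := PySem.Int.floordiv (L - 1) (d : Int) with hm
  set M : Nat := m.toNat with hMdef
  -- the fuel suffices: M < 0 + ((L - d).toNat + 1)
  have hfuel : M < (L - (d : Int)).toNat + 1 := by
    by_cases h : m ≤ 0
    · omega
    · have hmul : m * (d : Int) ≤ L - 1 :=
        (PySem.Int.le_floordiv_iff_mul_le (by exact_mod_cast hd)).mp (le_refl m)
      have : m + ((d : Int) - 1) ≤ m * d := by nlinarith
      omega
  have hloop := loop_eq_blocksUp cs L d hd M (by omega)
    ((L - (d : Int)).toNat + 1) 0 (by omega)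
  have z1 : (((0 : Nat) : Int)) * (d : Int) = 0 := by norm_num
  have z2 : ((((0 : Nat) : Int)) + 1) * (d : Int) = (d : Int) := by norm_num
  rw [z1, z2, Nat.sub_zero] at hloop
  rw [hloop]
  -- B side: rewrite its slice bounds into sliceN on Nat bounds
  rw [show max m 0 = ((M : Nat) : Int) from by omega]
  show (!blocksUp cs d 0 M) =
    decide (PySem.List.slice cs (some 0) (some (((M : Nat) : Int) * (d : Int))) ≠
            PySem.List.slice cs (some ((d : Nat) : Int)) (some ((((M : Nat) : Int) + 1) * (d : Int))))
  rw [show ((M : Nat) : Int) * (d : Int) = ((M * d : Nat) : Int) from by push_cast; ring]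
  rw [show (((M : Nat) : Int) + 1) * (d : Int) = (((M + 1) * d : Nat) : Int) from by push_cast; ring]
  rw [show (some (0 : Int)) = (some (((0 : Nat) : Int))) from by norm_num]
  rw [PySem.List.slice_natCast, PySem.List.slice_natCast]
  have hiff := blocksUp_true_iff cs d M 0
  rw [show (0 + M) * d = M * d from by ring, show (0 + 1 + M) * d = (M + 1) * d from by ring,
      show (0 + 1) * d = d from by ring, Nat.zero_mul] at hiff
  by_cases h : sliceN cs 0 (M * d) = sliceN cs d ((M + 1) * d)
  · rw [hiff.mpr h]
    unfold sliceN at h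
    simpa using h
  · have hb : blocksUp cs d 0 M = false := by
      cases hbv : blocksUp cs d 0 M
      · rfl
      · exact absurd (hiff.mp hbv) h
    unfold sliceN at h
    rw [hb]
    simpa using h
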